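-- pv_equiv track=rewrite | github.com/pyxiang/gap | gap_anno.py | calTemp
-- ===== SOURCE A (Python) =====
-- def calTemp(temp, a_chrname, a_chrname2, a_posbegin, a_posend, pos1, pos2, pos3, pos4):
--     if temp:
--         temp = list(temp)
--         region = ''
--         datasetid = []
--         gaptype = []
--         for i in temp:
--             if i[2][0] == a_chrname == a_chrname2:
--                 gaptype.append(i[2][1])
--                 datasetid.append(i[2][2])
--                 region = '{0}:{1}-{2}'.format(i[2][0], str(i[0]), str(i[1]))
--             elif i[2][0] == a_chrname:
--                 if i[0] <= pos1 and pos2 <= i[1]: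
--                     gaptype.append(i[2][1])
--                     datasetid.append(i[2][2])
--                     region = '{0}:{1}-{2}'.format(i[2][0], str(i[0]), str(i[1]))
--             elif i[2][0] == a_chrname2:
--                 if i[0] <= pos3 and pos4 <= i[1]:
--                     gaptype.append(i[2][1])
--                     datasetid.append(i[2][2])
--                     region = '{0}:{1}-{2}'.format(i[2][0], str(i[0]), str(i[1]))
--
--         return region, gaptype, datasetid
--
--     else:
--         return '', '', ''
-- ===== SOURCE B (Python) =====
-- def calTemp(temp, a_chrname, a_chrname2, a_posbegin, a_posend, pos1, pos2, pos3, pos4):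
--     if not temp:
--         return '', '', ''
--
--     # Hoist A's per-record branch logic out of the loop: the predicate depends
--     # only on whether the two query chromosome names coincide, decided once.
--     if a_chrname == a_chrname2:
--         ok = lambda i: i[2][0] == a_chrname
--     else:
--         ok = lambda i: (i[2][0] == a_chrname and i[0] <= pos1 and pos2 <= i[1]) \
--                     or (i[2][0] == a_chrname2 and i[0] <= pos3 and pos4 <= i[1])
--
--     # region = last matching record: scan the list in reverse and stop early.
--     region = ''
--     for i in reversed(temp):
--         if ok(i):
--             region = '{0}:{1}-{2}'.format(i[2][0], str(i[0]), str(i[1]))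
--             break
--
--     gaptype = [i[2][1] for i in temp if ok(i)]
--     datasetid = [i[2][2] for i in temp if ok(i)]
--     return region, gaptype, datasetid
-- ===== Notes on version B (the rewrite author's own statement) =====
-- stated objective: alternative
-- what changed: A's single accumulating loop with a three-branch body is replaced by a predicate chosen once outside the loop (case split on a_chrname == a_chrname2), an early-exit reverse scan for region, and two filtered comprehensions for the lists.
-- outside the precondition, e.g. on calTemp([], 'c', 'c', 0, 0, 0, 0, 0, 0): A returns ('', '', ''), B returns ('', '', '')
import Mathlib
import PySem

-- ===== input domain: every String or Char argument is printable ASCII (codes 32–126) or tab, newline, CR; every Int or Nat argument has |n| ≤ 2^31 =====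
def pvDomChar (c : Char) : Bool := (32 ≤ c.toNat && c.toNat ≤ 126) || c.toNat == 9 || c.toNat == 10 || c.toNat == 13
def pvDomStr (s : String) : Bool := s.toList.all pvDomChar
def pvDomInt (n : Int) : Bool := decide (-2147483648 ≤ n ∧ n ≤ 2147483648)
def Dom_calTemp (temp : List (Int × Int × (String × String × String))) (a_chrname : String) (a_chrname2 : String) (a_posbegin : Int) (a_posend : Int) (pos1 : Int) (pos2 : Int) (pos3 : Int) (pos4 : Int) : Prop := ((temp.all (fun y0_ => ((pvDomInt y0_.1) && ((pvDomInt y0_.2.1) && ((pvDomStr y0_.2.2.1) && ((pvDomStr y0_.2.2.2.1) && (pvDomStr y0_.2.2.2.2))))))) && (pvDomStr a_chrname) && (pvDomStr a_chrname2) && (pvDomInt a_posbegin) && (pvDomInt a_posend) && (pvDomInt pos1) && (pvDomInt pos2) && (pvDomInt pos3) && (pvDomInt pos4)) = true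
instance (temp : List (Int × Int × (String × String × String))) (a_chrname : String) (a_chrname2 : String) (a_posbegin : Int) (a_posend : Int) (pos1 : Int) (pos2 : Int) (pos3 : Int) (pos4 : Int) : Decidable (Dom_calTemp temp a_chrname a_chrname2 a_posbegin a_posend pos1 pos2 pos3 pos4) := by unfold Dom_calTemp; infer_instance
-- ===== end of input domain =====

-- B hoists the per-record branch logic out of the loop (one case split on a_chrname == a_chrname2),
-- finds region by an early-exit reverse scan, and builds the two lists by filtered comprehensions.

-- ===== PORT A =====
-- '{0}:{1}-{2}'.format(c, str(a), str(b))
def pvFmt (c : String) (a b : Int) : String :=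
  c ++ ":" ++ PySem.Int.toStr a ++ "-" ++ PySem.Int.toStr b

-- the body of A's for-loop on state (region, gaptype, datasetid)
def calTempStepA (a_chrname a_chrname2 : String) (pos1 pos2 pos3 pos4 : Int)
    (s : String × List String × List String) (i : Int × Int × (String × String × String)) :
    String × List String × List String :=
  if i.2.2.1 = a_chrname ∧ a_chrname = a_chrname2 then
    (pvFmt i.2.2.1 i.1 i.2.1, s.2.1 ++ [i.2.2.2.1], s.2.2 ++ [i.2.2.2.2])
  else if i.2.2.1 = a_chrname then
    if i.1 ≤ pos1 ∧ pos2 ≤ i.2.1 then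
      (pvFmt i.2.2.1 i.1 i.2.1, s.2.1 ++ [i.2.2.2.1], s.2.2 ++ [i.2.2.2.2])
    else s
  else if i.2.2.1 = a_chrname2 then
    if i.1 ≤ pos3 ∧ pos4 ≤ i.2.1 then
      (pvFmt i.2.2.1 i.1 i.2.1, s.2.1 ++ [i.2.2.2.1], s.2.2 ++ [i.2.2.2.2])
    else s
  else s

def calTemp (temp : List (Int × Int × (String × String × String))) (a_chrname : String) (a_chrname2 : String) (a_posbegin : Int) (a_posend : Int) (pos1 : Int) (pos2 : Int) (pos3 : Int) (pos4 : Int) : String × List String × List String :=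
  if temp ≠ [] then
    temp.foldl (calTempStepA a_chrname a_chrname2 pos1 pos2 pos3 pos4) ("", [], [])
  else
    -- Python returns ('', '', '') here: two plain strings where lists are declared; outside Pre_
    ("", [], [])

-- ===== PORT B =====
-- the predicate B picks when a_chrname == a_chrname2
def pvOkSame (a1 : String) (i : Int × Int × (String × String × String)) : Bool :=
  decide (i.2.2.1 = a1)

-- the predicate B picks when the two names differ
def pvOkDiff (a1 a2 : String) (p1 p2 p3 p4 : Int)
    (i : Int × Int × (String × String × String)) : Bool :=
  decide (i.2.2.1 = a1 ∧ i.1 ≤ p1 ∧ p2 ≤ i.2.1) ||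
  decide (i.2.2.1 = a2 ∧ i.1 ≤ p3 ∧ p4 ≤ i.2.1)

def calTemp_alt (temp : List (Int × Int × (String × String × String))) (a_chrname : String) (a_chrname2 : String) (a_posbegin : Int) (a_posend : Int) (pos1 : Int) (pos2 : Int) (pos3 : Int) (pos4 : Int) : String × List String × List String :=
  if temp = [] then
    -- Python returns ('', '', '') here: two plain strings where lists are declared; outside Pre_
    ("", [], [])
  else
    let ok := if a_chrname = a_chrname2 then pvOkSame a_chrname
              else pvOkDiff a_chrname a_chrname2 pos1 pos2 pos3 pos4
    -- 'for i in reversed(temp): if ok(i): region = …; break'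
    let region := match temp.reverse.find? ok with
      | some i => pvFmt i.2.2.1 i.1 i.2.1
      | none => ""
    (region, (temp.filter ok).map (fun i => i.2.2.2.1),
             (temp.filter ok).map (fun i => i.2.2.2.2))

-- ===== PRECONDITION & SPEC =====
-- Pre_ excludes only the empty temp list, where A returns ('', '', ''): two plain strings in the
-- positions where the declared type has lists of strings, a value outside the declared return type.
def Pre_calTemp (temp : List (Int × Int × (String × String × String))) (a_chrname : String) (a_chrname2 : String) (a_posbegin : Int) (a_posend : Int) (pos1 : Int) (pos2 : Int) (pos3 : Int) (pos4 : Int) : Prop := temp ≠ []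
instance (temp : List (Int × Int × (String × String × String))) (a_chrname : String) (a_chrname2 : String) (a_posbegin : Int) (a_posend : Int) (pos1 : Int) (pos2 : Int) (pos3 : Int) (pos4 : Int) : Decidable (Pre_calTemp temp a_chrname a_chrname2 a_posbegin a_posend pos1 pos2 pos3 pos4) := by unfold Pre_calTemp; infer_instance

def pvWitness_calTemp : (List (Int × Int × (String × String × String))) × String × String × Int × Int × Int × Int × Int × Int :=
  ([(1, 5, ("c1", "gap", "d1"))], "c1", "c1", 0, 0, 0, 0, 0, 0)

def Spec_calTemp (temp : List (Int × Int × (String × String × String))) (a_chrname : String) (a_chrname2 : String) (a_posbegin : Int) (a_posend : Int) (pos1 : Int) (pos2 : Int) (pos3 : Int) (pos4 : Int) (out : String × List String × List String) : Prop := out = calTemp_alt temp a_chrname a_chrname2 a_posbegin a_posend pos1 pos2 pos3 pos4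
instance (temp : List (Int × Int × (String × String × String))) (a_chrname : String) (a_chrname2 : String) (a_posbegin : Int) (a_posend : Int) (pos1 : Int) (pos2 : Int) (pos3 : Int) (pos4 : Int) (out : String × List String × List String) : Decidable (Spec_calTemp temp a_chrname a_chrname2 a_posbegin a_posend pos1 pos2 pos3 pos4 out) := by unfold Spec_calTemp; infer_instance

-- ===== CLAIM (what is proved, stated in full; the proofs are below) =====
def Claim_equal_calTemp : Prop := ∀ (temp : List (Int × Int × (String × String × String))) (a_chrname : String) (a_chrname2 : String) (a_posbegin : Int) (a_posend : Int) (pos1 : Int) (pos2 : Int) (pos3 : Int) (pos4 : Int), Dom_calTemp temp a_chrname a_chrname2 a_posbegin a_posend pos1 pos2 pos3 pos4 → Pre_calTemp temp a_chrname a_chrname2 a_posbegin a_posend pos1 pos2 pos3 pos4 → Spec_calTemp temp a_chrname a_chrname2 a_posbegin a_posend pos1 pos2 pos3 pos4 (calTemp temp a_chrname a_chrname2 a_posbegin a_posend pos1 pos2 pos3 pos4)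

-- ===== LEMMAS AND PROOFS =====
-- A's inline per-record acceptance condition, as one Boolean (proof device)
def pvMatch (a_chrname a_chrname2 : String) (pos1 pos2 pos3 pos4 : Int)
    (i : Int × Int × (String × String × String)) : Bool :=
  if i.2.2.1 = a_chrname ∧ a_chrname = a_chrname2 then true
  else if i.2.2.1 = a_chrname then decide (i.1 ≤ pos1 ∧ pos2 ≤ i.2.1)
  else if i.2.2.1 = a_chrname2 then decide (i.1 ≤ pos3 ∧ pos4 ≤ i.2.1)
  else false

-- A's loop body takes the matched action exactly when pvMatch holds
theorem calTempStepA_eq (a1 a2 : String) (p1 p2 p3 p4 : Int)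
    (s : String × List String × List String) (i : Int × Int × (String × String × String)) :
    calTempStepA a1 a2 p1 p2 p3 p4 s i =
      if pvMatch a1 a2 p1 p2 p3 p4 i then
        (pvFmt i.2.2.1 i.1 i.2.1, s.2.1 ++ [i.2.2.2.1], s.2.2 ++ [i.2.2.2.2])
      else s := by
  unfold calTempStepA pvMatch
  by_cases h1 : i.2.2.1 = a1 ∧ a1 = a2 <;> by_cases h2 : i.2.2.1 = a1 <;>
    by_cases h3 : i.2.2.1 = a2 <;> by_cases h4 : i.1 ≤ p1 ∧ p2 ≤ i.2.1 <;>
    by_cases h5 : i.1 ≤ p3 ∧ p4 ≤ i.2.1 <;> simp [h1, h2, h3, h4, h5] <;> simp_all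

-- B's hoisted predicate agrees with A's inline condition on every record
theorem ok_eq_pvMatch (a1 a2 : String) (p1 p2 p3 p4 : Int)
    (i : Int × Int × (String × String × String)) :
    (if a1 = a2 then pvOkSame a1 else pvOkDiff a1 a2 p1 p2 p3 p4) i =
      pvMatch a1 a2 p1 p2 p3 p4 i := by
  unfold pvOkSame pvOkDiff pvMatch
  by_cases he : a1 = a2 <;> by_cases h2 : i.2.2.1 = a1 <;> by_cases h3 : i.2.2.1 = a2 <;>
    simp [he, h2, h3] <;> simp_all <;> tauto

-- a fold that only records the last element
theorem foldl_last {α β : Type} (f : α → β) (r : β) (l : List α) :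
    l.foldl (fun _ m => f m) r = match l.getLast? with | some m => f m | none => r := by
  induction l generalizing r with
  | nil => rfl
  | cons x t ih =>
    cases t with
    | nil => rfl
    | cons y ts =>
      rw [List.foldl_cons, ih, List.getLast?_cons_cons]
      cases hq : (y :: ts).getLast? with
      | none => simp at hq
      | some m => simp

-- invariant of A's loop: region is the last matched record's format, the two lists are maps of the matches
theorem calTemp_loop_eq (a1 a2 : String) (p1 p2 p3 p4 : Int)
    (l : List (Int × Int × (String × String × String))) (r : String) (g d : List String) :
    l.foldl (calTempStepA a1 a2 p1 p2 p3 p4) (r, g, d) =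
      ((l.filter (pvMatch a1 a2 p1 p2 p3 p4)).foldl (fun _ m => pvFmt m.2.2.1 m.1 m.2.1) r,
       g ++ (l.filter (pvMatch a1 a2 p1 p2 p3 p4)).map (fun i => i.2.2.2.1),
       d ++ (l.filter (pvMatch a1 a2 p1 p2 p3 p4)).map (fun i => i.2.2.2.2)) := by
  induction l generalizing r g d with
  | nil => simp
  | cons x t ih =>
    simp only [List.foldl_cons, calTempStepA_eq, List.filter_cons]
    by_cases h : pvMatch a1 a2 p1 p2 p3 p4 x = true <;> simp [h, ih]

-- B's reverse scan with break finds exactly the last match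
theorem find?_reverse_eq {α : Type} (p : α → Bool) (l : List α) :
    l.reverse.find? p = (l.filter p).getLast? := by
  induction l with
  | nil => rfl
  | cons x t ih =>
    simp only [List.reverse_cons, List.find?_append, ih, List.filter_cons]
    by_cases h : p x = true <;>
      cases hl : t.filter p with
      | nil => simp [h, hl]
      | cons y ys =>
        simp only [h, hl]
        cases hq : (y :: ys).getLast? with
        | none => simp at hq
        | some m => simp [hq, List.getLast?_cons_cons]

-- ===== VERDICT (by name: the statement is the Claim_ definition above) =====
theorem calTemp_spec : Claim_equal_calTemp := by
  intro temp a1 a2 _ _ p1 p2 p3 p4 _ hpre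
  unfold Pre_calTemp at hpre
  unfold Spec_calTemp calTemp calTemp_alt
  rw [if_pos hpre, if_neg hpre, calTemp_loop_eq, foldl_last]
  have hok : (if a1 = a2 then pvOkSame a1 else pvOkDiff a1 a2 p1 p2 p3 p4) =
      pvMatch a1 a2 p1 p2 p3 p4 := funext (ok_eq_pvMatch a1 a2 p1 p2 p3 p4)
  simp only [hok, find?_reverse_eq, List.nil_append]
  cases (List.filter (pvMatch a1 a2 p1 p2 p3 p4) temp).getLast? <;> rfl
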